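-- pv_equiv track=rewrite | github.com/dqk0902/DSA_2025 | week3/stock.py | find_profits
-- ===== SOURCE A (Python) =====
-- def find_profits(prices):
--     if not prices:
--         return []
--
--     profits = []
--     min_price = prices[0]
--
--     for price in prices:
--         profit = max(0, price - min_price)
--         profits.append(profit)
--
--         if price < min_price:
--             min_price = price
--
--     return profits
-- ===== SOURCE B (Python) =====
-- def find_profits(prices):
--     if not prices:
--         return []
--     # pass 1: inclusive prefix minimum at each index
--     mins = []
--     m = prices[0]
--     for p in prices:
--         m = min(m, p)
--         mins.append(m)
--     # pass 2: map each (price, running min) to its profit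
--     return [max(0, p - m) for p, m in zip(prices, mins)]
-- ===== Notes on version B (the rewrite author's own statement) =====
-- stated objective: alternative
-- what changed: B replaces A's single fused loop (profit computed against an exclusive running min updated in the same iteration) by two separate passes: build the inclusive prefix-minimum list, then map (price, min) pairs to max(0, price-min).
import Mathlib
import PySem

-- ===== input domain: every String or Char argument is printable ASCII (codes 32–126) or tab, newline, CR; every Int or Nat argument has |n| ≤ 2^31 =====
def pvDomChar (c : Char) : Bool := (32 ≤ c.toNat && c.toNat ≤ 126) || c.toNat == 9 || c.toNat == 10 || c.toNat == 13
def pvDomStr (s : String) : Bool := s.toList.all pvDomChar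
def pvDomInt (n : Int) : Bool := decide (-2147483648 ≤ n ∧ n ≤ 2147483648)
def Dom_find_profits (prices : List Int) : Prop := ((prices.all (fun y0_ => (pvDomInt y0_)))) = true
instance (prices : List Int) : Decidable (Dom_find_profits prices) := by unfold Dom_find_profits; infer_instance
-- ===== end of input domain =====

-- B replaces A's fused loop by two separate passes (prefix-minimum list, then a map); alternative decomposition, same cost.


-- ===== PORT A =====
-- fused loop: profit against the current (exclusive) min, then update the min
def find_profits (prices : List Int) : List Int :=
  match prices with
  | [] => []
  | p0 :: _ =>
    (prices.foldl
      (fun (st : List Int × Int) price =>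
        (st.1 ++ [max 0 (price - st.2)], if price < st.2 then price else st.2))
      (([] : List Int), p0)).1

-- ===== PORT B =====
-- pass 1: inclusive prefix minimums (m is the running min carried in)
def prefixMins : Int → List Int → List Int
  | _, [] => []
  | m, p :: ps => min m p :: prefixMins (min m p) ps

def find_profits_alt (prices : List Int) : List Int :=
  match prices with
  | [] => []
  | p0 :: _ =>
    -- pass 2: map each (price, running min) pair to its profit
    (prices.zip (prefixMins p0 prices)).map (fun pm => max 0 (pm.1 - pm.2))

-- ===== PRECONDITION & SPEC =====
def Spec_find_profits (prices : List Int) (out : List Int) : Prop := out = find_profits_alt prices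
instance (prices : List Int) (out : List Int) : Decidable (Spec_find_profits prices out) := by unfold Spec_find_profits; infer_instance

-- ===== CLAIM (what is proved, stated in full; the proofs are below) =====
def Claim_equal_find_profits : Prop := ∀ (prices : List Int), Dom_find_profits prices → Spec_find_profits prices (find_profits prices)

-- ===== LEMMAS AND PROOFS =====
theorem fold_eq_zip_prefixMins (ps : List Int) : ∀ (acc : List Int) (m : Int),
    (ps.foldl
      (fun (st : List Int × Int) price =>
        (st.1 ++ [max 0 (price - st.2)], if price < st.2 then price else st.2))
      (acc, m)).1
    = acc ++ (ps.zip (prefixMins m ps)).map (fun pm => max 0 (pm.1 - pm.2)) := by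
  induction ps with
  | nil => intro acc m; simp
  | cons p ps ih =>
    intro acc m
    simp only [List.foldl_cons, prefixMins, List.zip_cons_cons, List.map_cons]
    rw [ih]
    have hmin : (if p < m then p else m) = min m p := by
      by_cases h : p < m
      · simp [min_eq_right h.le, if_pos h]
      · simp [min_eq_left (not_lt.mp h), if_neg h]
    have hmax : max 0 (p - m) = max 0 (p - min m p) := by
      by_cases h : p < m
      · rw [min_eq_right h.le]; omega
      · rw [min_eq_left (not_lt.mp h)]
    rw [hmin, hmax, List.append_assoc]
    simp

-- ===== VERDICT (by name: the statement is the Claim_ definition above) =====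
theorem find_profits_spec : Claim_equal_find_profits := by
  intro prices _
  unfold Spec_find_profits find_profits find_profits_alt
  match prices with
  | [] => rfl
  | p0 :: ps => simpa using fold_eq_zip_prefixMins (p0 :: ps) [] p0
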